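-- pv_equiv track=rewrite | github.com/EllenMcMullen/opynfield | src/opynfield/readin/run_all.py | types_to_groups
-- ===== SOURCE A (Python) =====
-- def types_to_groups(file_types_included: list[str], groups_and_types: dict[str: list[str]]) -> dict[str: list[str]]:
--     # for each type in the run, make a list of groups in that type
--     groups_by_filetype = dict()  # store results
--     for f_type in file_types_included:
--         # find all the groups that have this file type
--         groups = list()  # list of groups with file type
--         for gs in groups_and_types:
--             # does this group include this file type
--             if f_type in groups_and_types[gs]:
--                 groups.append(gs)  # if so add it
--         groups_by_filetype[f_type] = groups
--     return groups_by_filetype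
-- ===== SOURCE B (Python) =====
-- def types_to_groups(file_types_included: list[str], groups_and_types: dict[str: list[str]]) -> dict[str: list[str]]:
--     # one pass over groups_and_types builds an inverted index type -> groups,
--     # then the result is read off for each requested file type
--     inv = {}
--     for g, ts in groups_and_types.items():
--         for t in dict.fromkeys(ts):
--             inv.setdefault(t, []).append(g)
--     return {f: inv.get(f, []) for f in file_types_included}
-- ===== Notes on version B (the rewrite author's own statement) =====
-- stated objective: faster
-- what changed: Replaces A's per-type scan over all groups (membership test inside a double loop) by a single pass over groups_and_types that builds an inverted index type->groups, then reads the answer off for each requested type.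
import Mathlib
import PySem

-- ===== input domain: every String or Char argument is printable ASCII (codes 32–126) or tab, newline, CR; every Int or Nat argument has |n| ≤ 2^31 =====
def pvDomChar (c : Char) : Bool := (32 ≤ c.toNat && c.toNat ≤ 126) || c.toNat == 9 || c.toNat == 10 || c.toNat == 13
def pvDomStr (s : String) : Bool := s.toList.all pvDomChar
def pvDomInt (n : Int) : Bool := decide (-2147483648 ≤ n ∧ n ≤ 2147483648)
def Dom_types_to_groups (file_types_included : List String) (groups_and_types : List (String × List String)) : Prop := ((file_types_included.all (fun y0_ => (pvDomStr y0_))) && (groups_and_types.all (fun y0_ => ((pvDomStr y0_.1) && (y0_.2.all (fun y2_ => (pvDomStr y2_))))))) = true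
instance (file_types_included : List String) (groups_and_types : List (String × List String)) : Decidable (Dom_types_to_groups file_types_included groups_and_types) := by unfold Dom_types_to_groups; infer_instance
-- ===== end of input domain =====

-- B replaces A's nested scan (for each type, scan every group) by a single pass over
-- groups_and_types building an inverted index type→groups; objective: faster (asymptotic).

-- ===== PORT A =====
-- A: for each f_type, scan all dict keys gs and collect those with f_type ∈ groups_and_types[gs]
def types_to_groups (file_types_included : List String) (groups_and_types : List (String × List String)) : List (String × List String) :=
  (file_types_included.foldl
    (fun d f_type =>
      d.insert f_type
        (groups_and_types.foldl
          (fun groups p =>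
            if f_type ∈ (PySem.Dict.mk groups_and_types).getD p.1 [] then groups ++ [p.1] else groups)
          []))
    PySem.Dict.empty).items

-- ===== PORT B =====
-- B: inv = {}; for g, ts in items: for t in dict.fromkeys(ts): inv.setdefault(t, []).append(g);
--    return {f: inv.get(f, []) for f in file_types_included}
def types_to_groups_alt (file_types_included : List String) (groups_and_types : List (String × List String)) : List (String × List String) :=
  let inv : PySem.Dict String (List String) :=
    groups_and_types.foldl
      (fun d p =>
        (PySem.List.dedup p.2).foldl (fun d t => d.insert t (d.getD t [] ++ [p.1])) d)
      PySem.Dict.empty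
  (file_types_included.foldl
    (fun d f => d.insert f (inv.getD f [])) PySem.Dict.empty).items

-- ===== PRECONDITION & SPEC =====
-- Pre_ requires the group keys to be pairwise distinct: the Python parameter is a dict,
-- whose keys are necessarily distinct, so an association list with duplicate keys does not
-- represent any input Python A ever receives (no input A returns on is excluded).
def Pre_types_to_groups (file_types_included : List String) (groups_and_types : List (String × List String)) : Prop :=
  (groups_and_types.map Prod.fst).Nodup
instance (file_types_included : List String) (groups_and_types : List (String × List String)) : Decidable (Pre_types_to_groups file_types_included groups_and_types) := by unfold Pre_types_to_groups; infer_instance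

def pvWitness_types_to_groups : List String × (List (String × List String)) :=
  (["a", "b"], [("g1", ["a"]), ("g2", ["a", "c"])])

def Spec_types_to_groups (file_types_included : List String) (groups_and_types : List (String × List String)) (out : List (String × List String)) : Prop := out = types_to_groups_alt file_types_included groups_and_types
instance (file_types_included : List String) (groups_and_types : List (String × List String)) (out : List (String × List String)) : Decidable (Spec_types_to_groups file_types_included groups_and_types out) := by unfold Spec_types_to_groups; infer_instance

-- ===== CLAIM (what is proved, stated in full; the proofs are below) =====
def Claim_equal_types_to_groups : Prop := ∀ (file_types_included : List String) (groups_and_types : List (String × List String)), Dom_types_to_groups file_types_included groups_and_types → Pre_types_to_groups file_types_included groups_and_types → Spec_types_to_groups file_types_included groups_and_types (types_to_groups file_types_included groups_and_types)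

-- ===== LEMMAS AND PROOFS =====

-- the inner setdefault/append loop of B over a duplicate-free list of types
theorem getD_inner_loop (g : String) (S : List String) (hS : S.Nodup)
    (d : PySem.Dict String (List String)) (f : String) :
    (S.foldl (fun d t => d.insert t (d.getD t [] ++ [g])) d).getD f []
      = if f ∈ S then d.getD f [] ++ [g] else d.getD f [] := by
  induction S generalizing d with
  | nil => simp
  | cons t S ih =>
    rcases List.nodup_cons.mp hS with ⟨ht, hS'⟩
    simp only [List.foldl_cons, ih hS', List.mem_cons]
    by_cases hf : f ∈ S
    · have hft : f ≠ t := fun h => ht (h ▸ hf)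
      simp [hf, hft, PySem.Dict.getD_insert]
    · by_cases hfe : f = t
      · simp [hf, hfe, ht, PySem.Dict.getD_insert]
      · simp [hf, hfe, PySem.Dict.getD_insert]

-- B's inverted index looked up at f is the (key-order) list of groups whose type list contains f
theorem getD_inv (gat : List (String × List String)) (d : PySem.Dict String (List String)) (f : String) :
    (gat.foldl (fun d p =>
        (PySem.List.dedup p.2).foldl (fun d t => d.insert t (d.getD t [] ++ [p.1])) d)
      d).getD f []
      = d.getD f [] ++ ((gat.filter (fun p => f ∈ p.2)).map Prod.fst) := by
  induction gat generalizing d with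
  | nil => simp
  | cons p gat ih =>
    simp only [List.foldl_cons, ih, getD_inner_loop p.1 (PySem.List.dedup p.2) (PySem.List.nodup_dedup p.2) d f,
      PySem.List.mem_dedup, List.filter_cons]
    by_cases hf : f ∈ p.2 <;> simp [hf]

-- A's inner append loop collects, in order, the first components passing the test
theorem foldl_if_append (f : String) (gat : List (String × List String)) (acc : List String) :
    gat.foldl (fun groups p => if f ∈ p.2 then groups ++ [p.1] else groups) acc
      = acc ++ (gat.filter (fun p => decide (f ∈ p.2))).map Prod.fst := by
  induction gat generalizing acc with
  | nil => simp
  | cons p gat ih =>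
    simp only [List.foldl_cons, List.filter_cons]
    by_cases hf : f ∈ p.2 <;> simp [hf, ih]

-- under distinct keys, A's lookup groups_and_types[p.1] returns p.2 for each pair p of the list
theorem a_inner_value (gat : List (String × List String)) (hnd : (gat.map Prod.fst).Nodup) (f : String) :
    gat.foldl (fun groups p =>
        if f ∈ (PySem.Dict.mk gat).getD p.1 [] then groups ++ [p.1] else groups) []
      = (gat.filter (fun p => f ∈ p.2)).map Prod.fst := by
  have hkeys : (PySem.Dict.mk gat).keys.Nodup := hnd
  rw [PySem.List.foldl_congr_mem (g := fun groups p => if f ∈ p.2 then groups ++ [p.1] else groups)]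
  · rw [foldl_if_append]
    simp
  · intro acc p hp
    have : (PySem.Dict.mk gat).getD p.1 [] = p.2 :=
      PySem.Dict.getD_of_mem_items (PySem.Dict.mk gat) (k := p.1) (v := p.2) hp hkeys []
    rw [this]

-- two insert-loops over the same keys with pointwise-equal values build the same dict
theorem foldl_insert_congr (fts : List String) (vA vB : String → List String)
    (h : ∀ f, vA f = vB f) (d : PySem.Dict String (List String)) :
    fts.foldl (fun d f => d.insert f (vA f)) d = fts.foldl (fun d f => d.insert f (vB f)) d := by
  induction fts generalizing d with
  | nil => rfl
  | cons f fts ih => simp only [List.foldl_cons, h f, ih]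

-- ===== VERDICT (by name: the statement is the Claim_ definition above) =====
theorem types_to_groups_spec : Claim_equal_types_to_groups := by
  intro fts gat _ hpre
  unfold Spec_types_to_groups types_to_groups types_to_groups_alt
  congr 1
  refine foldl_insert_congr fts _ _ (fun f => ?_) PySem.Dict.empty
  rw [a_inner_value gat hpre f, getD_inv gat PySem.Dict.empty f]
  simp
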